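-- pv_equiv track=rewrite | github.com/ecoinfoai/bhu_text_mining | src/forma/domain_concept_extractor.py | _fuzzy_section_match
-- ===== SOURCE A (Python) =====
-- def _fuzzy_section_match(section: str, candidates: list[str]) -> str | None:
--     """Find the best fuzzy match for a section name among candidates.
--
--     Uses substring containment in both directions: checks if the section
--     name is contained in a candidate or vice versa.
--
--     Args:
--         section: Section name to match.
--         candidates: List of candidate names.
--
--     Returns:
--         Best matching candidate, or None if no match found.
--     """
--     section_clean = section.strip()
--     if not section_clean:
--         return None
--
--     # Exact match first
--     for c in candidates:
--         if c == section_clean: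
--             return c
--
--     # Substring match (section in candidate or candidate in section)
--     for c in candidates:
--         if section_clean in c or c in section_clean:
--             return c
--
--     return None
-- ===== SOURCE B (Python) =====
-- def _fuzzy_section_match(section: str, candidates: list[str]) -> str | None:
--     """Single pass: return an exact match immediately; remember the first
--     substring match as a fallback and return it at the end."""
--     section_clean = section.strip()
--     if not section_clean:
--         return None
--     fallback = None
--     for c in candidates:
--         if c == section_clean:
--             return c
--         if fallback is None and (section_clean in c or c in section_clean):
--             fallback = c
--     return fallback
-- ===== Notes on version B (the rewrite author's own statement) =====
-- stated objective: alternative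
-- what changed: Replaces A's two sequential scans (exact pass, then substring pass) by a single scan that returns an exact match immediately and keeps the first substring match as a fallback returned after the loop.
import Mathlib
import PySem

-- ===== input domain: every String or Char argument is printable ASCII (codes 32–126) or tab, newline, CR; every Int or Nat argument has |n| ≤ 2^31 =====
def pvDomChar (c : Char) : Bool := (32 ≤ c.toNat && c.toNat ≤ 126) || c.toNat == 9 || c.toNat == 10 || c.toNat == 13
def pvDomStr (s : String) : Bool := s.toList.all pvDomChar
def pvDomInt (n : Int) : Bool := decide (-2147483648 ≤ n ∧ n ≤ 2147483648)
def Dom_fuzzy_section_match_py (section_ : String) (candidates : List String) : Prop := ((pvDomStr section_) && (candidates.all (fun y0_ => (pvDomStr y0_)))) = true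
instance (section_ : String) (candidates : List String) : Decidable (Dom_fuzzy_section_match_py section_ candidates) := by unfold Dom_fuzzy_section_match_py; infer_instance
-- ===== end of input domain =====

-- B replaces A's two sequential scans by one scan with a first-substring fallback; same return value, no side effects.


-- ===== PORT A =====
-- first loop of A: exact match
def fuzzyA_exact (sc : String) : List String → Option String
  | [] => none
  | c :: t => if c = sc then some c else fuzzyA_exact sc t

-- second loop of A: substring match in either direction
def fuzzyA_sub (sc : String) : List String → Option String
  | [] => none
  | c :: t =>
    if PySem.Str.isIn sc c || PySem.Str.isIn c sc then some c else fuzzyA_sub sc t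

def fuzzy_section_match_py (section_ : String) (candidates : List String) : Option String :=
  let section_clean := PySem.Str.strip section_
  if section_clean = "" then none
  else
    match fuzzyA_exact section_clean candidates with
    | some c => some c
    | none => fuzzyA_sub section_clean candidates

-- ===== PORT B =====
-- B's single loop, carrying the fallback
def fuzzyB_loop (sc : String) (fallback : Option String) : List String → Option String
  | [] => fallback
  | c :: t =>
    if c = sc then some c
    else if fallback = none ∧ (PySem.Str.isIn sc c || PySem.Str.isIn c sc) then
      fuzzyB_loop sc (some c) t
    else fuzzyB_loop sc fallback t

def fuzzy_section_match_py_alt (section_ : String) (candidates : List String) : Option String :=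
  let section_clean := PySem.Str.strip section_
  if section_clean = "" then none
  else fuzzyB_loop section_clean none candidates

-- ===== PRECONDITION & SPEC =====
def Spec_fuzzy_section_match_py (section_ : String) (candidates : List String) (out : Option String) : Prop := out = fuzzy_section_match_py_alt section_ candidates
instance (section_ : String) (candidates : List String) (out : Option String) : Decidable (Spec_fuzzy_section_match_py section_ candidates out) := by unfold Spec_fuzzy_section_match_py; infer_instance

-- ===== CLAIM (what is proved, stated in full; the proofs are below) =====
def Claim_equal_fuzzy_section_match_py : Prop := ∀ (section_ : String) (candidates : List String), Dom_fuzzy_section_match_py section_ candidates → Spec_fuzzy_section_match_py section_ candidates (fuzzy_section_match_py section_ candidates)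

-- ===== LEMMAS AND PROOFS =====
-- Loop invariant: B's single pass equals A's exact pass, falling back to the carried
-- fallback and then to A's substring pass.
theorem fuzzyB_loop_eq (sc : String) (l : List String) (fb : Option String) :
    fuzzyB_loop sc fb l =
      match fuzzyA_exact sc l with
      | some c => some c
      | none => match fb with
                | some f => some f
                | none => fuzzyA_sub sc l := by
  induction l generalizing fb with
  | nil => cases fb <;> simp [fuzzyB_loop, fuzzyA_exact, fuzzyA_sub]
  | cons c t ih =>
    by_cases hc : c = sc
    · simp [fuzzyB_loop, fuzzyA_exact, hc]
    · by_cases hs : (PySem.Str.isIn sc c || PySem.Str.isIn c sc) = true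
      · cases fb with
        | none =>
          cases hE : fuzzyA_exact sc t <;>
            simp [fuzzyB_loop, fuzzyA_exact, fuzzyA_sub, hc, hs, ih, hE]
        | some f => simp [fuzzyB_loop, fuzzyA_exact, hc, ih]
      · cases fb with
        | none =>
          cases hE : fuzzyA_exact sc t <;>
            simp [fuzzyB_loop, fuzzyA_exact, fuzzyA_sub, hc, hs, ih, hE]
        | some f => simp [fuzzyB_loop, fuzzyA_exact, hc, ih]

-- ===== VERDICT (by name: the statement is the Claim_ definition above) =====
theorem fuzzy_section_match_py_spec : Claim_equal_fuzzy_section_match_py := by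
  intro section_ candidates _
  unfold Spec_fuzzy_section_match_py fuzzy_section_match_py fuzzy_section_match_py_alt
  by_cases h : PySem.Str.strip section_ = ""
  · simp [h]
  · simp only [h, if_false, fuzzyB_loop_eq]
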